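-- pv_equiv track=rewrite | github.com/Carlos-Jr/thermalbits | thermalbits/iron_circuit_sim/scripts/run_parallel_chunks.py | build_chunk_plan
-- ===== SOURCE A (Python) =====
-- def build_chunk_plan(n_pis: int, num_chunks: int) -> list[tuple[int, int, int]]:
--     if num_chunks <= 0:
--         raise SystemExit("num_chunks must be a positive integer")
--     if n_pis > 63:
--         raise SystemExit(
--             f"Full chunk sweep requires <= 63 PIs so 2^n fits in u64; found {n_pis}"
--         )
--
--     total_vectors = 1 << n_pis
--     if num_chunks > total_vectors:
--         raise SystemExit(
--             f"num_chunks={num_chunks} is larger than total vectors={total_vectors}"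
--         )
--
--     base = total_vectors // num_chunks
--     rem = total_vectors % num_chunks
--     start = 0
--     plan: list[tuple[int, int, int]] = []
--
--     for idx in range(num_chunks):
--         count = base + (1 if idx < rem else 0)
--         plan.append((idx, start, count))
--         start += count
--
--     return plan
-- ===== SOURCE B (Python) =====
-- def build_chunk_plan(n_pis: int, num_chunks: int) -> list[tuple[int, int, int]]:
--     if num_chunks <= 0:
--         raise SystemExit("num_chunks must be a positive integer")
--     if n_pis > 63:
--         raise SystemExit(
--             f"Full chunk sweep requires <= 63 PIs so 2^n fits in u64; found {n_pis}"
--         )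
--
--     total_vectors = 1 << n_pis
--     if num_chunks > total_vectors:
--         raise SystemExit(
--             f"num_chunks={num_chunks} is larger than total vectors={total_vectors}"
--         )
--
--     # Greedy fair split: each chunk takes the ceiling of what is left divided by
--     # the number of chunks still to fill.  No base/rem precomputation.
--     plan: list[tuple[int, int, int]] = []
--     start = 0
--     remaining = total_vectors
--     chunks_left = num_chunks
--     while chunks_left > 0:
--         count = -(-remaining // chunks_left)
--         plan.append((num_chunks - chunks_left, start, count))
--         start += count
--         remaining -= count
--         chunks_left -= 1
--     return plan
-- ===== Notes on version B (the rewrite author's own statement) =====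
-- stated objective: alternative
-- what changed: Replaces A's precomputed base/rem quotient-remainder scheme by a greedy loop that gives each chunk the ceiling of remaining_vectors / chunks_left, counting chunks_left down and tracking the remaining vector budget instead of base, rem and a threaded start of fixed-size chunks.
import Mathlib
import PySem

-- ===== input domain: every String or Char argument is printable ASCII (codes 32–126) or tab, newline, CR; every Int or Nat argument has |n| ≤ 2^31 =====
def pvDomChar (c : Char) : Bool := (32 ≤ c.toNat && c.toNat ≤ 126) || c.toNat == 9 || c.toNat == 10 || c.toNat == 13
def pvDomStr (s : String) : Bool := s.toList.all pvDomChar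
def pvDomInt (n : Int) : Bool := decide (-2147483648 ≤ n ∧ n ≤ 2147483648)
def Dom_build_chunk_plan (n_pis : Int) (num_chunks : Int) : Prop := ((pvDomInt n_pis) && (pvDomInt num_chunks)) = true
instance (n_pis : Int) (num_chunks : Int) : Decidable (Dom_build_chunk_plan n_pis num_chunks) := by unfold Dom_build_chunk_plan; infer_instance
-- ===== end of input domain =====

-- B replaces A's base/rem scheme by a greedy ceil(remaining/chunks_left) distributor (alternative algorithm; same cost).


-- ===== PORT A =====
-- literal port: guards are handled by Pre_ (A raises SystemExit there; `1 << n_pis` also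
-- raises ValueError for negative n_pis); loop threads (start, plan) over range(num_chunks)
def build_chunk_plan (n_pis : Int) (num_chunks : Int) : List (Int × Int × Int) :=
  let total_vectors : Int := (2 ^ n_pis.toNat : Int)
  let base := PySem.Int.floordiv total_vectors num_chunks
  let rem := PySem.Int.mod total_vectors num_chunks
  let st := (PySem.List.pyRange 0 num_chunks 1).foldl
    (fun (st : Int × List (Int × Int × Int)) idx =>
      let count := base + (if idx < rem then 1 else 0)
      (st.1 + count, st.2 ++ [(idx, st.1, count)]))
    (0, [])
  st.2

-- ===== PORT B =====
-- the while loop becomes structural recursion on chunks_left (a Nat, since the loop runs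
-- while chunks_left > 0); count = -(-remaining // chunks_left) is Python ceil division
def bLoop (chunks_left : Nat) (num_chunks start remaining : Int) : List (Int × Int × Int) :=
  match chunks_left with
  | 0 => []
  | k + 1 =>
    let count := -(PySem.Int.floordiv (-remaining) ((k : Int) + 1))
    (num_chunks - ((k : Int) + 1), start, count)
      :: bLoop k num_chunks (start + count) (remaining - count)

def build_chunk_plan_alt (n_pis : Int) (num_chunks : Int) : List (Int × Int × Int) :=
  let total_vectors : Int := (2 ^ n_pis.toNat : Int)
  bLoop num_chunks.toNat num_chunks 0 total_vectors

-- ===== PRECONDITION & SPEC =====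
-- Pre_ excludes exactly the inputs where A raises: SystemExit for num_chunks <= 0,
-- n_pis > 63 or num_chunks > 2^n_pis, and ValueError (negative shift) for n_pis < 0.
def Pre_build_chunk_plan (n_pis : Int) (num_chunks : Int) : Prop :=
  0 ≤ n_pis ∧ n_pis ≤ 63 ∧ 1 ≤ num_chunks ∧ num_chunks ≤ (2 ^ n_pis.toNat : Int)
instance (n_pis : Int) (num_chunks : Int) : Decidable (Pre_build_chunk_plan n_pis num_chunks) := by
  unfold Pre_build_chunk_plan; infer_instance
def pvWitness_build_chunk_plan : Int × Int := (4, 5)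

def Spec_build_chunk_plan (n_pis : Int) (num_chunks : Int) (out : List (Int × Int × Int)) : Prop := out = build_chunk_plan_alt n_pis num_chunks
instance (n_pis : Int) (num_chunks : Int) (out : List (Int × Int × Int)) : Decidable (Spec_build_chunk_plan n_pis num_chunks out) := by unfold Spec_build_chunk_plan; infer_instance

-- ===== CLAIM (what is proved, stated in full; the proofs are below) =====
def Claim_equal_build_chunk_plan : Prop := ∀ (n_pis : Int) (num_chunks : Int), Dom_build_chunk_plan n_pis num_chunks → Pre_build_chunk_plan n_pis num_chunks → Spec_build_chunk_plan n_pis num_chunks (build_chunk_plan n_pis num_chunks)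

-- ===== LEMMAS AND PROOFS =====

-- A-side invariant: after m iterations, start = m*base + min m rem and the plan is the closed map
theorem chunk_loop_closed (base rem : Int) (hrem : 0 ≤ rem) : ∀ (m : Nat),
    (PySem.List.pyRange 0 (m : Int) 1).foldl
      (fun (st : Int × List (Int × Int × Int)) idx =>
        (st.1 + (base + (if idx < rem then 1 else 0)),
         st.2 ++ [(idx, st.1, base + (if idx < rem then 1 else 0))]))
      (0, [])
    = ((m : Int) * base + min (m : Int) rem,
       (PySem.List.pyRange 0 (m : Int) 1).map
         (fun idx => (idx, idx * base + min idx rem, base + (if idx < rem then 1 else 0)))) := by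
  intro m
  induction m with
  | zero => simpa using hrem
  | succ k ih =>
    have hcast : ((k + 1 : Nat) : Int) = (k : Int) + 1 := by push_cast; ring
    rw [hcast, PySem.List.pyRange_one_succ_right (by positivity),
        List.foldl_append, List.map_append, ih]
    simp only [List.foldl_cons, List.foldl_nil, List.map_cons, List.map_nil]
    simp only [Prod.mk.injEq, and_true]
    have hlin : ((k : Int) + 1) * base = (k : Int) * base + base := by ring
    rw [hlin]
    split_ifs with h <;> omega

-- B-side invariant: with i = N - k chunks already emitted, start and remaining are at their
-- closed-form values and the rest of the loop produces the same closed map as A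
theorem bLoop_closed (base rem N : Int) (h0 : 0 ≤ rem) (hN : rem ≤ N) : ∀ (k : Nat) (i : Int),
    i = N - (k : Int) →
    bLoop k N (i * base + min i rem) ((k : Int) * base + max (rem - i) 0)
    = (PySem.List.pyRange i N 1).map
        (fun idx => (idx, idx * base + min idx rem, base + (if idx < rem then 1 else 0))) := by
  intro k
  induction k with
  | zero =>
    intro i hi
    rw [bLoop, PySem.List.pyRange_one_eq_nil (by omega), List.map_nil]
  | succ k ih =>
    intro i hi
    have hik : i < N := by omega
    rw [PySem.List.pyRange_one_cons hik, List.map_cons, bLoop]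
    have hcount :
        -(PySem.Int.floordiv (-(((k : Int) + 1) * base + max (rem - i) 0)) ((k : Int) + 1))
          = base + (if i < rem then 1 else 0) := by
      rw [PySem.Int.neg_floordiv_neg_eq_iff_of_pos (by positivity)]
      split_ifs with h
      · have hmax : max (rem - i) 0 = rem - i := by omega
        rw [hmax]
        constructor
        · ring_nf
          have : 0 < rem - i := by omega
          nlinarith [this]
        · ring_nf
          have : rem - i ≤ (k : Int) + 1 := by omega
          nlinarith [this]
      · have hmax : max (rem - i) 0 = 0 := by omega
        rw [hmax]
        constructor
        · ring_nf
          have : (0 : Int) < (k : Int) + 1 := by positivity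
          nlinarith [this]
        · ring_nf
          nlinarith [le_refl ((k : Int) * base)]
    push_cast
    rw [hcount]
    have hrest := ih (i + 1) (by omega)
    have hstart : i * base + min i rem + (base + (if i < rem then 1 else 0))
        = (i + 1) * base + min (i + 1) rem := by
      split_ifs with h
      · have m1 : min i rem = i := by omega
        have m2 : min (i + 1) rem = i + 1 := by omega
        rw [m1, m2]; ring
      · have m1 : min i rem = rem := by omega
        have m2 : min (i + 1) rem = rem := by omega
        rw [m1, m2]; ring
    have hrem' : (((k : Int) + 1) * base + max (rem - i) 0) - (base + (if i < rem then 1 else 0))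
        = (k : Int) * base + max (rem - (i + 1)) 0 := by
      split_ifs with h
      · have m1 : max (rem - i) 0 = rem - i := by omega
        have m2 : max (rem - (i + 1)) 0 = rem - (i + 1) := by omega
        rw [m1, m2]; ring
      · have m1 : max (rem - i) 0 = 0 := by omega
        have m2 : max (rem - (i + 1)) 0 = 0 := by omega
        rw [m1, m2]; ring
    rw [hstart, hrem', hrest]
    push_cast at hi
    rw [hi]

-- ===== VERDICT =====
theorem build_chunk_plan_spec : Claim_equal_build_chunk_plan := by
  intro n_pis num_chunks _ hpre
  obtain ⟨h0, h63, h1, hle⟩ := hpre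
  unfold Spec_build_chunk_plan build_chunk_plan build_chunk_plan_alt
  simp only []
  set T : Int := (2 ^ n_pis.toNat : Int) with hT
  have hm : ((num_chunks.toNat : Nat) : Int) = num_chunks := by omega
  have hdivmod := PySem.Int.floordiv_mul_add_mod T num_chunks
  have hrpos : 0 ≤ PySem.Int.mod T num_chunks ∧ PySem.Int.mod T num_chunks < num_chunks := by
    rw [PySem.Int.mod_eq_emod_of_pos (by omega)]
    exact ⟨Int.emod_nonneg _ (by omega), Int.emod_lt_of_pos _ (by omega)⟩
  rw [show PySem.List.pyRange 0 num_chunks 1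
        = PySem.List.pyRange 0 ((num_chunks.toNat : Nat) : Int) 1 from by rw [hm]]
  rw [chunk_loop_closed (PySem.Int.floordiv T num_chunks) (PySem.Int.mod T num_chunks)
        hrpos.1 num_chunks.toNat]
  have hb := bLoop_closed (PySem.Int.floordiv T num_chunks) (PySem.Int.mod T num_chunks)
      num_chunks hrpos.1 (by omega) num_chunks.toNat 0 (by omega)
  simp only [zero_mul, zero_add, sub_zero, min_eq_left hrpos.1, max_eq_left hrpos.1] at hb
  have hTval : ((num_chunks.toNat : Nat) : Int) * PySem.Int.floordiv T num_chunks
      + PySem.Int.mod T num_chunks = T := by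
    rw [hm]; linarith [hdivmod]
  rw [hTval] at hb
  rw [hm]
  exact hb.symm
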